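-- pv_equiv track=rewrite | github.com/Rosie-ODonnell/advent-of-code | 2024/day-two/task-one.py | check_number_of_safe_reports
-- ===== SOURCE A (Python) =====
-- def filter_out_non_increasing_or_decreasing_levels(x):
--
--     if x == sorted(x) or x == sorted(x, reverse=True):
--         if len(x) == len(set(x)):
--             return True
--     else:
--         return False
--
-- def check_number_of_safe_reports(reports):
--     number_of_safe_reports = 0
--     filtered_reports = list(filter(filter_out_non_increasing_or_decreasing_levels, reports))
--     for row in filtered_reports:
--         differences = [abs(j-i) for i, j in zip(row[:-1], row[1:])]
--         if all([num in [1,2,3] for num in differences]):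
--
--             number_of_safe_reports += 1
--
--
--
--     return number_of_safe_reports
-- ===== SOURCE B (Python) =====
-- def _within(row, lo, hi):
--     for i, j in zip(row, row[1:]):
--         if not (lo <= j - i <= hi):
--             return False
--     return True
--
--
-- def _safe(row):
--     if len(row) < 2:
--         return True
--     if row[0] < row[1]:
--         return _within(row, 1, 3)
--     return _within(row, -3, -1)
--
--
-- def check_number_of_safe_reports(reports):
--     return sum(1 for row in reports if _safe(row))
-- ===== Notes on version B (the rewrite author's own statement) =====
-- stated objective: faster
-- what changed: Instead of sorting each row twice, deduplicating it through a set and then mapping absolute differences, B makes one linear scan per row that fixes the direction from the first pair and checks every adjacent step is between 1 and 3.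
import Mathlib
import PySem

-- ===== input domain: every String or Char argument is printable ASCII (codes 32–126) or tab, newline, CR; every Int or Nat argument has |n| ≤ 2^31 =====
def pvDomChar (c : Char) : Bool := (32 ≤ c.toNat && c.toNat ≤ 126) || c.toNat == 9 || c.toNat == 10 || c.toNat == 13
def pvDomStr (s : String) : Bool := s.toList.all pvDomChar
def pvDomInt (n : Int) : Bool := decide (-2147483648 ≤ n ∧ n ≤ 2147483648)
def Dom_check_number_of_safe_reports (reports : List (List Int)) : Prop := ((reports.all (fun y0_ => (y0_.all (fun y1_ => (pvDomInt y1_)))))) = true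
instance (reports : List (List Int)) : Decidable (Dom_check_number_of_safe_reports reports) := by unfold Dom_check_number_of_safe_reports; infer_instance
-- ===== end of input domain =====

-- B replaces A's per-row double sort + set dedup + abs-difference pass by one linear scan per
-- row that fixes the direction from the first pair and checks each step is between 1 and 3.

-- ===== PORT A =====
def filter_out_non_increasing_or_decreasing_levels (x : List Int) : Bool :=
  if x = PySem.List.sorted x (fun v => v) false ∨ x = PySem.List.sorted x (fun v => v) true then
    -- the inner 'if' returns True; falling through it returns None, which filter treats as falsy
    decide (x.length = (PySem.Set.ofList x).length)
  else false

def check_number_of_safe_reports (reports : List (List Int)) : Int :=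
  let filtered_reports := reports.filter filter_out_non_increasing_or_decreasing_levels
  filtered_reports.foldl (fun acc row =>
    let differences := ((PySem.List.slice row none (some (-1))).zip
                        (PySem.List.slice row (some 1) none)).map (fun p => |p.2 - p.1|)
    if differences.all (fun num => decide (num ∈ ([1, 2, 3] : List Int))) then acc + 1 else acc) 0

-- ===== PORT B =====
def pvWithin (row : List Int) (lo hi : Int) : Bool :=
  match row with
  | i :: j :: rest => if lo ≤ j - i ∧ j - i ≤ hi then pvWithin (j :: rest) lo hi else false
  | _ => true

def pvSafe (row : List Int) : Bool :=
  match row with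
  | a :: b :: _ => if a < b then pvWithin row 1 3 else pvWithin row (-3) (-1)
  | _ => true

def check_number_of_safe_reports_alt (reports : List (List Int)) : Int :=
  (reports.countP pvSafe : Int)

-- ===== PRECONDITION & SPEC =====
def Spec_check_number_of_safe_reports (reports : List (List Int)) (out : Int) : Prop := out = check_number_of_safe_reports_alt reports
instance (reports : List (List Int)) (out : Int) : Decidable (Spec_check_number_of_safe_reports reports out) := by unfold Spec_check_number_of_safe_reports; infer_instance

-- ===== CLAIM (what is proved, stated in full; the proofs are below) =====
def Claim_equal_check_number_of_safe_reports : Prop := ∀ (reports : List (List Int)), Dom_check_number_of_safe_reports reports → Spec_check_number_of_safe_reports reports (check_number_of_safe_reports reports)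

-- ===== LEMMAS AND PROOFS =====

/-- A's per-row difference test, named for the proofs. -/
def pvQ (row : List Int) : Bool :=
  (((PySem.List.slice row none (some (-1))).zip (PySem.List.slice row (some 1) none)).map
    (fun p => |p.2 - p.1|)).all (fun num => decide (num ∈ ([1, 2, 3] : List Int)))

/-- The adjacent pairs of a list. -/
def pvPairs : List Int → List (Int × Int)
  | a :: b :: t => (a, b) :: pvPairs (b :: t)
  | _ => []

theorem pvPairs_eq_zip : ∀ (l : List Int), l.dropLast.zip l.tail = pvPairs l := by
  intro l
  match l with
  | [] => rfl
  | [a] => rfl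
  | a :: b :: t =>
    have ih := pvPairs_eq_zip (b :: t)
    simp only [pvPairs, List.tail] at *
    cases t <;> simp_all [List.dropLast, List.zip, List.zipWith]

theorem pvWithin_iff (row : List Int) (lo hi : Int) :
    pvWithin row lo hi = true ↔ ∀ p ∈ pvPairs row, lo ≤ p.2 - p.1 ∧ p.2 - p.1 ≤ hi := by
  match row with
  | [] => simp [pvWithin, pvPairs]
  | [a] => simp [pvWithin, pvPairs]
  | a :: b :: t =>
    have ih := pvWithin_iff (b :: t) lo hi
    simp only [pvWithin, pvPairs]
    by_cases h : lo ≤ b - a ∧ b - a ≤ hi <;> simp [h, ih]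
    omega

theorem pvPairwise_of_pairs {R : Int → Int → Prop} (htr : Transitive R) :
    ∀ (l : List Int), (∀ p ∈ pvPairs l, R p.1 p.2) → l.Pairwise R := by
  intro l
  match l with
  | [] => intro _; simp
  | [a] => intro _; simp
  | a :: b :: t =>
    intro h
    have hab : R a b := h (a, b) (by simp [pvPairs])
    have ih := pvPairwise_of_pairs htr (b :: t) (fun p hp => h p (by simp [pvPairs, hp]))
    refine List.pairwise_cons.mpr ⟨?_, ih⟩
    intro y hy
    rcases List.mem_cons.mp hy with rfl | hy'
    · exact hab
    · exact htr hab (List.rel_of_pairwise_cons ih hy')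

theorem pvPairs_of_pairwise {R : Int → Int → Prop} :
    ∀ (l : List Int), l.Pairwise R → ∀ p ∈ pvPairs l, R p.1 p.2 := by
  intro l
  match l with
  | [] => intro _ p hp; simp [pvPairs] at hp
  | [a] => intro _ p hp; simp [pvPairs] at hp
  | a :: b :: t =>
    intro h p hp
    have h' := List.pairwise_cons.mp h
    rcases List.mem_cons.mp hp with rfl | hp'
    · exact h'.1 b (by simp)
    · exact pvPairs_of_pairwise (b :: t) h'.2 p hp'

/-- A's side, characterised over the adjacent pairs. -/
theorem pvA_iff (row : List Int) :
    (filter_out_non_increasing_or_decreasing_levels row && pvQ row) = true ↔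
      ((∀ p ∈ pvPairs row, 1 ≤ p.2 - p.1 ∧ p.2 - p.1 ≤ 3) ∨
       (∀ p ∈ pvPairs row, -3 ≤ p.2 - p.1 ∧ p.2 - p.1 ≤ -1)) := by
  have hsl : (PySem.List.slice row none (some (-1))).zip (PySem.List.slice row (some 1) none)
      = pvPairs row := by
    rw [PySem.List.slice_to_neg_one, PySem.List.slice_from_one, pvPairs_eq_zip]
  constructor
  · rintro h
    obtain ⟨hf, hq⟩ : filter_out_non_increasing_or_decreasing_levels row = true ∧
        pvQ row = true := by simpa using h
    have hall : ∀ p ∈ pvPairs row, |p.2 - p.1| ∈ ([1, 2, 3] : List Int) := by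
      have := hq
      unfold pvQ at this
      rw [hsl] at this
      simp only [List.all_eq_true, List.mem_map, decide_eq_true_eq] at this
      intro p hp; exact this _ ⟨p, hp, rfl⟩
    unfold filter_out_non_increasing_or_decreasing_levels at hf
    split at hf
    · rename_i hsort
      rcases hsort with hasc | hdesc
      · left
        intro p hp
        have hle : p.1 ≤ p.2 := by
          have hpw := PySem.List.sorted_pairwise row (fun v => v)
          rw [← hasc] at hpw
          exact pvPairs_of_pairwise row hpw p hp
        have h2 := hall p hp
        simp only [List.mem_cons, List.not_mem_nil, or_false] at h2
        rw [abs_of_nonneg (by omega)] at h2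
        omega
      · right
        intro p hp
        have hge : p.2 ≤ p.1 := by
          have hpw := PySem.List.sorted_pairwise_rev row (fun v => v)
          rw [← hdesc] at hpw
          exact pvPairs_of_pairwise row hpw p hp
        have h2 := hall p hp
        simp only [List.mem_cons, List.not_mem_nil, or_false] at h2
        rw [abs_of_nonpos (by omega)] at h2
        omega
    · exact absurd hf (by simp)
  · intro h
    have hQ : pvQ row = true := by
      unfold pvQ
      rw [hsl]
      simp only [List.all_eq_true, List.mem_map, decide_eq_true_eq]
      rintro num ⟨p, hp, rfl⟩
      rcases h with h | h
      · obtain ⟨h1, h2⟩ := h p hp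
        have habs : |p.2 - p.1| = p.2 - p.1 := abs_of_nonneg (by omega)
        rw [habs]; simp; omega
      · obtain ⟨h1, h2⟩ := h p hp
        have habs : |p.2 - p.1| = -(p.2 - p.1) := abs_of_nonpos (by omega)
        rw [habs]; simp; omega
    have hsorted : row = PySem.List.sorted row (fun v => v) false ∨
        row = PySem.List.sorted row (fun v => v) true := by
      rcases h with h | h
      · left
        have hpw : row.Pairwise (· < ·) :=
          pvPairwise_of_pairs (R := (· < ·)) (fun _ _ _ => lt_trans) row
            (fun p hp => by obtain ⟨h1, h2⟩ := h p hp; show p.1 < p.2; omega)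
        exact (PySem.List.sorted_eq_of_perm_of_pairwise_lt row row (fun v => v) (List.Perm.refl row) hpw).symm
      · right
        have hpw : row.Pairwise (fun a b => b < a) :=
          pvPairwise_of_pairs (R := fun a b => b < a) (fun _ _ _ hab hbc => lt_trans hbc hab) row
            (fun p hp => by obtain ⟨h1, h2⟩ := h p hp; show p.2 < p.1; omega)
        exact (PySem.List.sorted_rev_eq_of_perm_of_pairwise_gt row row (fun v => v) (List.Perm.refl row) hpw).symm
    have hnodup : row.Nodup := by
      rcases h with h | h
      · exact (pvPairwise_of_pairs (R := (· < ·)) (fun _ _ _ => lt_trans) row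
          (fun p hp => by obtain ⟨h1, h2⟩ := h p hp; show p.1 < p.2; omega)).imp
          (fun h => ne_of_lt h)
      · exact (pvPairwise_of_pairs (R := fun a b => b < a) (fun _ _ _ hab hbc => lt_trans hbc hab) row
          (fun p hp => by obtain ⟨h1, h2⟩ := h p hp; show p.2 < p.1; omega)).imp
          (fun h => ne_of_gt h)
    have hlen : row.length = (PySem.Set.ofList row).length := by
      rw [PySem.Set.ofList_eq_self_of_nodup row hnodup]
    unfold filter_out_non_increasing_or_decreasing_levels
    rw [if_pos hsorted]
    simp [hlen, hQ]

/-- B's side, characterised over the adjacent pairs. -/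
theorem pvSafe_iff (row : List Int) :
    pvSafe row = true ↔
      ((∀ p ∈ pvPairs row, 1 ≤ p.2 - p.1 ∧ p.2 - p.1 ≤ 3) ∨
       (∀ p ∈ pvPairs row, -3 ≤ p.2 - p.1 ∧ p.2 - p.1 ≤ -1)) := by
  match row with
  | [] => simp [pvSafe, pvPairs]
  | [a] => simp [pvSafe, pvPairs]
  | a :: b :: t =>
    have hmem : (a, b) ∈ pvPairs (a :: b :: t) := by simp [pvPairs]
    have hred : pvSafe (a :: b :: t)
        = if a < b then pvWithin (a :: b :: t) 1 3 else pvWithin (a :: b :: t) (-3) (-1) := rfl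
    rw [hred]
    by_cases hab : a < b
    · rw [if_pos hab, pvWithin_iff]
      constructor
      · exact Or.inl
      · rintro (h | h)
        · exact h
        · have := h _ hmem; omega
    · rw [if_neg hab, pvWithin_iff]
      constructor
      · exact Or.inr
      · rintro (h | h)
        · have := h _ hmem; omega
        · exact h

theorem pvRow_eq (row : List Int) :
    (filter_out_non_increasing_or_decreasing_levels row && pvQ row) = pvSafe row := by
  rw [Bool.eq_iff_iff, pvA_iff, pvSafe_iff]

theorem pvCount (l : List (List Int)) : ∀ (acc : Int),
    (l.filter filter_out_non_increasing_or_decreasing_levels).foldl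
      (fun a r => if pvQ r then a + 1 else a) acc
      = acc + ((l.countP
          (fun r => filter_out_non_increasing_or_decreasing_levels r && pvQ r) : Nat) : Int) := by
  induction l with
  | nil => simp
  | cons a l ih =>
    intro acc
    by_cases hp : filter_out_non_increasing_or_decreasing_levels a = true <;>
      by_cases hq : pvQ a = true <;>
      simp [List.filter_cons, List.countP_cons, hp, hq, ih] <;> push_cast <;> ring_nf

-- ===== VERDICT (by name: the statement is the Claim_ definition above) =====
theorem check_number_of_safe_reports_spec : Claim_equal_check_number_of_safe_reports := by
  intro reports _
  unfold Spec_check_number_of_safe_reports check_number_of_safe_reports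
    check_number_of_safe_reports_alt
  have hbody : (fun (acc : Int) (row : List Int) =>
      let differences := ((PySem.List.slice row none (some (-1))).zip
                          (PySem.List.slice row (some 1) none)).map (fun p => |p.2 - p.1|)
      if differences.all (fun num => decide (num ∈ ([1, 2, 3] : List Int))) then acc + 1 else acc)
      = (fun (a : Int) (r : List Int) => if pvQ r then a + 1 else a) := by
    funext acc row; rfl
  rw [hbody, pvCount reports 0,
      List.countP_congr (fun r _ => by rw [pvRow_eq r])]
  simp
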